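-- pv_equiv track=rewrite | github.com/JaewanHwang/algorithm-study | problems/pro_시험장 나누기/황재완_2c.py | go
-- ===== SOURCE A (Python) =====
-- def go(dp, v, num, links, L):
--     if dp[v][0] != -1:
--         return False
--     i, j = links[v]
--     if go(dp, i, num, links, L):
--         return True
--     if go(dp, j, num, links, L):
--         return True
--
--     if num[v] + dp[i][1] + dp[j][1] <= L:
--         dp[v][0] = dp[i][0] + dp[j][0] - 1
--         dp[v][1] = num[v] + dp[i][1] + dp[j][1]
--     elif num[v] + dp[i][1] <= L or num[v] + dp[j][1] <= L:
--         dp[v][0] = dp[i][0] + dp[j][0]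
--         dp[v][1] = num[v] + min(dp[i][1], dp[j][1])
--     elif num[v] <= L:
--         dp[v][0] = dp[i][0] + dp[j][0] + 1
--         dp[v][1] = num[v]
--     else:
--         return True
--     return False
-- ===== SOURCE B (Python) =====
-- def go(dp, v, num, links, L):
--     # Iterative post-order traversal with an explicit stack and a local memo
--     # dict (dp is not mutated; equivalence with A is about the return value).
--     memo = {}
--
--     def gval(y):
--         return memo[y] if y in memo else (dp[y][0], dp[y][1])
--
--     stack = [(v, False)]
--     while stack:
--         x, ready = stack.pop()
--         if not ready:
--             if x in memo or dp[x][0] != -1: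
--                 continue
--             i, j = links[x]
--             stack.append((x, True))
--             stack.append((j, False))
--             stack.append((i, False))
--         else:
--             i, j = links[x]
--             ci, si = gval(i)
--             cj, sj = gval(j)
--             nx = num[x]
--             if nx + si + sj <= L:
--                 memo[x] = (ci + cj - 1, nx + si + sj)
--             elif nx + si <= L or nx + sj <= L:
--                 memo[x] = (ci + cj, nx + min(si, sj))
--             elif nx <= L:
--                 memo[x] = (ci + cj + 1, nx)
--             else:
--                 return True
--     return False
-- ===== Notes on version B (the rewrite author's own statement) =====
-- stated objective: alternative
-- what changed: Replaces A's short-circuiting recursion (which memoizes by mutating dp in place) with an iterative post-order traversal using an explicit stack of (node, ready) frames and a local memo dict, bailing out with True the moment a node fails the three-way size test; dp is not mutated, so the equivalence is about the return value.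
import Mathlib
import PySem

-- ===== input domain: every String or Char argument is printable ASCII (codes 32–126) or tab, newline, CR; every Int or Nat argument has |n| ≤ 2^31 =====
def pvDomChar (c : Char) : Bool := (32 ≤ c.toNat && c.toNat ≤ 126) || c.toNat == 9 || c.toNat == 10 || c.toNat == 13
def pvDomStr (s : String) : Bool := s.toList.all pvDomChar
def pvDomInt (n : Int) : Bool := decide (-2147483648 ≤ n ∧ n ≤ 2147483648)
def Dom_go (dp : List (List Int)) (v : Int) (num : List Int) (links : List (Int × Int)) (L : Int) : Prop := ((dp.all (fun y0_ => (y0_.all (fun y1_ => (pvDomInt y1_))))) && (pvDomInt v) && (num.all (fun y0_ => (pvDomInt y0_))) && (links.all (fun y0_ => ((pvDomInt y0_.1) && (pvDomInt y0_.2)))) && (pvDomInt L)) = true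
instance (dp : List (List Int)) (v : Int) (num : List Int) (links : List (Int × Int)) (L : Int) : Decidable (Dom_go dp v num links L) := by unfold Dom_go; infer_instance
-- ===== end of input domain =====

-- B replaces A's short-circuiting recursion by an iterative post-order traversal with an
-- explicit stack and a local memo dict (objective: alternative decomposition, same cost).
-- A mutates dp in place, B does not: the equivalence proved here is about the RETURN value only.

-- ===== PORT A =====
-- xs[i] read with Python index semantics (exact inside Pre_, where every read is in range)
def pyAt (xs : List Int) (k : Int) : Int := PySem.List.pyGetD xs k 0
def pyRow (dp : List (List Int)) (x : Int) : List Int := PySem.List.pyGetD dp x []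
def pyLink (links : List (Int × Int)) (x : Int) : Int × Int := PySem.List.pyGetD links x (0, 0)
-- the Python statement dp[x][k] = w (exact inside Pre_, where x and k are in range)
def setCell (dp : List (List Int)) (x : Int) (k : Int) (w : Int) : List (List Int) :=
  PySem.List.pySetD dp x (PySem.List.pySetD (pyRow dp x) k w)

-- A's recursion, fuel-indexed for totality (dp.length + 1 is enough fuel inside Pre_;
-- fuel exhaustion, unreachable inside Pre_, yields (dp, true))
def goA (num : List Int) (links : List (Int × Int)) (L : Int) :
    Nat → List (List Int) → Int → List (List Int) × Bool
  | 0, dp, _ => (dp, true)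
  | fuel + 1, dp, v =>
    if pyAt (pyRow dp v) 0 ≠ -1 then (dp, false)
    else
      let ij := pyLink links v
      let r1 := goA num links L fuel dp ij.1
      if r1.2 then r1
      else
        let r2 := goA num links L fuel r1.1 ij.2
        if r2.2 then r2
        else
          let dp2 := r2.1
          let nx := pyAt num v
          let di0 := pyAt (pyRow dp2 ij.1) 0
          let di1 := pyAt (pyRow dp2 ij.1) 1
          let dj0 := pyAt (pyRow dp2 ij.2) 0
          let dj1 := pyAt (pyRow dp2 ij.2) 1
          if nx + di1 + dj1 ≤ L then
            (setCell (setCell dp2 v 0 (di0 + dj0 - 1)) v 1 (nx + di1 + dj1), false)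
          else if nx + di1 ≤ L ∨ nx + dj1 ≤ L then
            (setCell (setCell dp2 v 0 (di0 + dj0)) v 1 (nx + min di1 dj1), false)
          else if nx ≤ L then
            (setCell (setCell dp2 v 0 (di0 + dj0 + 1)) v 1 nx, false)
          else (dp2, true)

def go (dp : List (List Int)) (v : Int) (num : List Int) (links : List (Int × Int)) (L : Int) : Bool :=
  (goA num links L (dp.length + 1) dp v).2

-- ===== PORT B =====
-- gval(y): memo[y] if present, else (dp[y][0], dp[y][1])
def bGet (memo : PySem.Dict Int (Int × Int)) (dp : List (List Int)) (y : Int) : Int × Int :=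
  match memo.get? y with
  | some p => p
  | none => (pyAt (pyRow dp y) 0, pyAt (pyRow dp y) 1)

-- B's while-loop over the explicit stack (head = top), fuel-indexed for totality
-- (2 * 3 ^ dp.length + 1 is enough fuel inside Pre_; exhaustion, unreachable there, yields true)
def loopB (dp : List (List Int)) (num : List Int) (links : List (Int × Int)) (L : Int) :
    Nat → List (Int × Bool) → PySem.Dict Int (Int × Int) → Bool
  | _, [], _ => false
  | 0, _ :: _, _ => true
  | fuel + 1, (x, ready) :: rest, memo =>
    if ready then
      let ij := pyLink links x
      let pi := bGet memo dp ij.1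
      let pj := bGet memo dp ij.2
      let nx := pyAt num x
      if nx + pi.2 + pj.2 ≤ L then
        loopB dp num links L fuel rest (memo.insert x (pi.1 + pj.1 - 1, nx + pi.2 + pj.2))
      else if nx + pi.2 ≤ L ∨ nx + pj.2 ≤ L then
        loopB dp num links L fuel rest (memo.insert x (pi.1 + pj.1, nx + min pi.2 pj.2))
      else if nx ≤ L then
        loopB dp num links L fuel rest (memo.insert x (pi.1 + pj.1 + 1, nx))
      else true
    else
      if (memo.get? x).isSome || pyAt (pyRow dp x) 0 ≠ -1 then
        loopB dp num links L fuel rest memo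
      else
        let ij := pyLink links x
        loopB dp num links L fuel ((ij.1, false) :: (ij.2, false) :: (x, true) :: rest) memo

def go_alt (dp : List (List Int)) (v : Int) (num : List Int) (links : List (Int × Int)) (L : Int) : Bool :=
  loopB dp num links L (2 * 3 ^ dp.length + 1) [(v, false)] PySem.Dict.empty

-- ===== PRECONDITION & SPEC =====
-- the immediate-memo case: dp[v] exists (Python index semantics), is nonempty, and dp[v][0] != -1
def preMemo (dp : List (List Int)) (v : Int) : Bool :=
  match PySem.List.pyGet? dp v with
  | none => false
  | some row =>
    match PySem.List.pyGet? row 0 with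
    | none => false
    | some a => a != -1
-- the recursive case: v in range, num/links long enough, rows of width ≥ 2, and every
-- unmemoized node's two children have smaller (nonnegative) indices, so the recursion
-- terminates and every index is in range
def preRec (dp : List (List Int)) (v : Int) (num : List Int) (links : List (Int × Int)) : Bool :=
  (0 ≤ v) && (v < dp.length) && (dp.length ≤ num.length) && (dp.length ≤ links.length) &&
  dp.all (fun r => 2 ≤ r.length) &&
  (List.range dp.length).all (fun k =>
    ((dp.getD k []).getD 0 0 != -1) ||
    ((0 ≤ (links.getD k (0, 0)).1) && ((links.getD k (0, 0)).1 < (k : Int)) &&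
     (0 ≤ (links.getD k (0, 0)).2) && ((links.getD k (0, 0)).2 < (k : Int))))
-- Pre_ excludes inputs where A raises (IndexError or unbounded recursion), and — because
-- recursion safety is certified by the closed-form decreasing-children condition — it also
-- excludes some terminating inputs A returns on (a DAG not ordered with children below
-- parents, or a negative unmemoized start vertex); on those A and B agree anyway.
def Pre_go (dp : List (List Int)) (v : Int) (num : List Int) (links : List (Int × Int)) (L : Int) : Prop :=
  (preMemo dp v || preRec dp v num links) = true
instance (dp : List (List Int)) (v : Int) (num : List Int) (links : List (Int × Int)) (L : Int) : Decidable (Pre_go dp v num links L) := by unfold Pre_go; infer_instance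

def pvWitness_go : List (List Int) × Int × List Int × (List (Int × Int)) × Int :=
  ([[1, 2]], 0, [1], [(0, 0)], 1)

def Spec_go (dp : List (List Int)) (v : Int) (num : List Int) (links : List (Int × Int)) (L : Int) (out : Bool) : Prop := out = go_alt dp v num links L
instance (dp : List (List Int)) (v : Int) (num : List Int) (links : List (Int × Int)) (L : Int) (out : Bool) : Decidable (Spec_go dp v num links L out) := by unfold Spec_go; infer_instance

-- ===== CLAIM (what is proved, stated in full; the proofs are below) =====
def Claim_equal_go : Prop := ∀ (dp : List (List Int)) (v : Int) (num : List Int) (links : List (Int × Int)) (L : Int), Dom_go dp v num links L → Pre_go dp v num links L → Spec_go dp v num links L (go dp v num links L)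

-- ===== LEMMAS AND PROOFS =====

-- seed values of a node in the ORIGINAL dp
def seed0 (dp : List (List Int)) (k : Nat) : Int := (dp.getD k []).getD 0 0
def seed1 (dp : List (List Int)) (k : Nat) : Int := (dp.getD k []).getD 1 0

-- the shared three-way size test; none = the failing else branch
def combine (L nx ci si cj sj : Int) : Option (Int × Int) :=
  if nx + si + sj ≤ L then some (ci + cj - 1, nx + si + sj)
  else if nx + si ≤ L ∨ nx + sj ≤ L then some (ci + cj, nx + min si sj)
  else if nx ≤ L then some (ci + cj + 1, nx)
  else none

-- mathematical value of node k: its final (count, size), or none if its subtree fails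
def nodeVal (dp : List (List Int)) (num : List Int) (links : List (Int × Int)) (L : Int) : Nat → Option (Int × Int)
  | x =>
    if seed0 dp x ≠ -1 then some (seed0 dp x, seed1 dp x)
    else
      let ij := links.getD x (0, 0)
      if h : 0 ≤ ij.1 ∧ ij.1.toNat < x ∧ 0 ≤ ij.2 ∧ ij.2.toNat < x then
        match nodeVal dp num links L ij.1.toNat, nodeVal dp num links L ij.2.toNat with
        | some p, some q => combine L (num.getD x 0) p.1 p.2 q.1 q.2
        | _, _ => none
      else none
  termination_by x => x
  decreasing_by
  · exact h.2.1
  · exact h.2.2.2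

lemma nodeVal_eq (dp : List (List Int)) (num : List Int) (links : List (Int × Int)) (L : Int) (x : Nat) :
    nodeVal dp num links L x =
    if seed0 dp x ≠ -1 then some (seed0 dp x, seed1 dp x)
    else
      let ij := links.getD x (0, 0)
      if h : 0 ≤ ij.1 ∧ ij.1.toNat < x ∧ 0 ≤ ij.2 ∧ ij.2.toNat < x then
        match nodeVal dp num links L ij.1.toNat, nodeVal dp num links L ij.2.toNat with
        | some p, some q => combine L (num.getD x 0) p.1 p.2 q.1 q.2
        | _, _ => none
      else none := by
  rw [nodeVal]

-- A-side invariant: dp' is dp with some nodes' rows overwritten by their nodeVal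
def dcompat (dp : List (List Int)) (num : List Int) (links : List (Int × Int)) (L : Int) (dp' : List (List Int)) : Prop :=
  dp'.length = dp.length ∧ ∀ k, k < dp.length →
    dp'.getD k [] = dp.getD k [] ∨
    ∃ c s, nodeVal dp num links L k = some (c, s) ∧ dp'.getD k [] = ((dp.getD k []).set 0 c).set 1 s

def dresolved (dp : List (List Int)) (num : List Int) (links : List (Int × Int)) (L : Int) (dp' : List (List Int)) (k : Nat) : Prop :=
  nodeVal dp num links L k = some ((dp'.getD k []).getD 0 0, (dp'.getD k []).getD 1 0)

-- B-side invariants on the memo dict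
def mcompat (dp : List (List Int)) (num : List Int) (links : List (Int × Int)) (L : Int) (memo : PySem.Dict Int (Int × Int)) : Prop :=
  ∀ (k : Int) (p : Int × Int), memo.get? k = some p → 0 ≤ k ∧ nodeVal dp num links L k.toNat = some p

def mresolved (dp : List (List Int)) (num : List Int) (links : List (Int × Int)) (L : Int) (memo : PySem.Dict Int (Int × Int)) (k : Nat) : Prop :=
  nodeVal dp num links L k = some (bGet memo dp (k : Int))

-- unpacked form of preRec
lemma preRec_iff (dp : List (List Int)) (v : Int) (num : List Int) (links : List (Int × Int)) :
    preRec dp v num links = true ↔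
    0 ≤ v ∧ v < dp.length ∧ dp.length ≤ num.length ∧ dp.length ≤ links.length ∧
    (∀ r ∈ dp, 2 ≤ r.length) ∧
    (∀ k, k < dp.length →
      seed0 dp k ≠ -1 ∨
      (0 ≤ (links.getD k (0, 0)).1 ∧ (links.getD k (0, 0)).1 < (k : Int) ∧
       0 ≤ (links.getD k (0, 0)).2 ∧ (links.getD k (0, 0)).2 < (k : Int))) := by
  simp [preRec, List.all_eq_true, List.mem_range, seed0, and_assoc]

lemma pyAt_natCast (xs : List Int) (k : Nat) : pyAt xs (k : Int) = xs.getD k 0 := by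
  simp [pyAt]

lemma pyRow_natCast (dp : List (List Int)) (k : Nat) : pyRow dp (k : Int) = dp.getD k [] := by
  simp [pyRow]

lemma pyLink_natCast (links : List (Int × Int)) (k : Nat) : pyLink links (k : Int) = links.getD k (0, 0) := by
  simp [pyLink]

lemma pyAt_row_zero (dp' : List (List Int)) (x : Nat) :
    pyAt (pyRow dp' (x : Int)) 0 = (dp'.getD x []).getD 0 0 := by
  rw [pyRow_natCast, pyAt, PySem.List.pyGetD_zero]

lemma pyAt_row_one (dp' : List (List Int)) (x : Nat) :
    pyAt (pyRow dp' (x : Int)) 1 = (dp'.getD x []).getD 1 0 := by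
  rw [pyRow_natCast]
  generalize dp'.getD x [] = l
  rcases l with _ | ⟨a, l⟩
  · simp [pyAt, PySem.List.pyGetD, PySem.List.pyGet?, PySem.List.pyIdx?]
  · rcases l with _ | ⟨b, l⟩ <;>
      simp [pyAt, PySem.List.pyGetD, PySem.List.pyGet?, PySem.List.pyIdx?]

-- one unfolding step of A's recursion (definitional)
lemma goA_step (num : List Int) (links : List (Int × Int)) (L : Int) (fuel : Nat) (dp : List (List Int)) (v : Int) :
    goA num links L (fuel + 1) dp v =
    if pyAt (pyRow dp v) 0 ≠ -1 then (dp, false)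
    else
      let ij := pyLink links v
      let r1 := goA num links L fuel dp ij.1
      if r1.2 then r1
      else
        let r2 := goA num links L fuel r1.1 ij.2
        if r2.2 then r2
        else
          let dp2 := r2.1
          let nx := pyAt num v
          let di0 := pyAt (pyRow dp2 ij.1) 0
          let di1 := pyAt (pyRow dp2 ij.1) 1
          let dj0 := pyAt (pyRow dp2 ij.2) 0
          let dj1 := pyAt (pyRow dp2 ij.2) 1
          if nx + di1 + dj1 ≤ L then
            (setCell (setCell dp2 v 0 (di0 + dj0 - 1)) v 1 (nx + di1 + dj1), false)
          else if nx + di1 ≤ L ∨ nx + dj1 ≤ L then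
            (setCell (setCell dp2 v 0 (di0 + dj0)) v 1 (nx + min di1 dj1), false)
          else if nx ≤ L then
            (setCell (setCell dp2 v 0 (di0 + dj0 + 1)) v 1 nx, false)
          else (dp2, true) := rfl

-- one unfolding step of B's loop (definitional)
lemma loopB_nil (dp : List (List Int)) (num : List Int) (links : List (Int × Int)) (L : Int)
    (fuel : Nat) (memo : PySem.Dict Int (Int × Int)) :
    loopB dp num links L fuel [] memo = false := by
  cases fuel <;> rfl

lemma loopB_wait (dp : List (List Int)) (num : List Int) (links : List (Int × Int)) (L : Int)
    (fuel : Nat) (x : Int) (rest : List (Int × Bool)) (memo : PySem.Dict Int (Int × Int)) :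
    loopB dp num links L (fuel + 1) ((x, false) :: rest) memo =
    if (memo.get? x).isSome || pyAt (pyRow dp x) 0 ≠ -1 then
      loopB dp num links L fuel rest memo
    else
      loopB dp num links L fuel
        (((pyLink links x).1, false) :: ((pyLink links x).2, false) :: (x, true) :: rest) memo := rfl

lemma loopB_ready (dp : List (List Int)) (num : List Int) (links : List (Int × Int)) (L : Int)
    (fuel : Nat) (x : Int) (rest : List (Int × Bool)) (memo : PySem.Dict Int (Int × Int)) :
    loopB dp num links L (fuel + 1) ((x, true) :: rest) memo =
    (let ij := pyLink links x
     let pi := bGet memo dp ij.1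
     let pj := bGet memo dp ij.2
     let nx := pyAt num x
     if nx + pi.2 + pj.2 ≤ L then
       loopB dp num links L fuel rest (memo.insert x (pi.1 + pj.1 - 1, nx + pi.2 + pj.2))
     else if nx + pi.2 ≤ L ∨ nx + pj.2 ≤ L then
       loopB dp num links L fuel rest (memo.insert x (pi.1 + pj.1, nx + min pi.2 pj.2))
     else if nx ≤ L then
       loopB dp num links L fuel rest (memo.insert x (pi.1 + pj.1 + 1, nx))
     else true) := rfl

-- rows touched by a write keep their value at the other index
lemma getD_set_self' {α : Type} (l : List α) (k : Nat) (r : α) (d : α) (h : k < l.length) :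
    (l.set k r).getD k d = r := by
  rw [List.getD_eq_getElem _ _ (by simpa using h)]
  simp [List.getElem_set_self]

lemma getD_set_ne' {α : Type} (l : List α) (k m : Nat) (r : α) (d : α) (h : m ≠ k) :
    (l.set k r).getD m d = l.getD m d := by
  unfold List.getD
  rw [List.getElem?_set_ne (by omega)]

-- reading back a row written at indices 0 and 1
lemma read_set_pair (l : List Int) (c s : Int) (hl : 2 ≤ l.length) :
    ((l.set 0 c).set 1 s).getD 0 0 = c ∧ ((l.set 0 c).set 1 s).getD 1 0 = s := by
  rcases l with _ | ⟨a, l⟩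
  · simp at hl
  rcases l with _ | ⟨b, l⟩
  · simp at hl
  simp [List.set]

-- rewriting an already-written row with the same values is a no-op
lemma set_pair_idem (l : List Int) (c s : Int) :
    (((l.set 0 c).set 1 s).set 0 c).set 1 s = (l.set 0 c).set 1 s := by
  rw [@List.set_comm _ s c 1 0 (l.set 0 c) (by omega), List.set_set, List.set_set]

-- the two cell writes of A, seen as one row update
lemma setCell_pair (dp2 : List (List Int)) (x : Nat) (c s : Int) (hx : x < dp2.length) :
    setCell (setCell dp2 (x : Int) 0 c) (x : Int) 1 s =
    dp2.set x (((dp2.getD x []).set 0 c).set 1 s) := by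
  have h1 : setCell dp2 (x : Int) 0 c = dp2.set x ((dp2.getD x []).set 0 c) := by
    rw [setCell, pyRow_natCast]
    rw [show ((0 : Int) = ((0 : Nat) : Int)) from rfl]
    rw [PySem.List.pySetD_natCast, PySem.List.pySetD_natCast]
  rw [h1, setCell, pyRow_natCast]
  rw [getD_set_self' _ _ _ _ hx]
  rw [show ((1 : Int) = ((1 : Nat) : Int)) from rfl]
  rw [PySem.List.pySetD_natCast, PySem.List.pySetD_natCast, List.set_set]

lemma some_pair_inj {a b c d : Int} (h : (some (a, b) : Option (Int × Int)) = some (c, d)) :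
    a = c ∧ b = d := by
  simp only [Option.some.injEq, Prod.mk.injEq] at h; exact h

lemma goA_sim (dp : List (List Int)) (num : List Int) (links : List (Int × Int)) (L : Int)
    (hrows : ∀ r ∈ dp, 2 ≤ r.length)
    (hcond : ∀ k, k < dp.length →
      seed0 dp k ≠ -1 ∨
      (0 ≤ (links.getD k (0, 0)).1 ∧ (links.getD k (0, 0)).1 < (k : Int) ∧
       0 ≤ (links.getD k (0, 0)).2 ∧ (links.getD k (0, 0)).2 < (k : Int))) :
    ∀ x : Nat, x < dp.length → ∀ dp', dcompat dp num links L dp' →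
      (nodeVal dp num links L x = none → ∀ f : Nat, x < f → (goA num links L f dp' (x : Int)).2 = true) ∧
      (∀ c s, nodeVal dp num links L x = some (c, s) →
        ∃ dp'', dcompat dp num links L dp'' ∧
          (∀ k, k < dp.length → dresolved dp num links L dp' k → dresolved dp num links L dp'' k) ∧
          dresolved dp num links L dp'' x ∧
          ∀ f : Nat, x < f → goA num links L f dp' (x : Int) = (dp'', false)) := by
  intro x
  induction x using Nat.strong_induction_on with
  | _ x IH =>
  intro hx dp' hdp
  have hmemx : dp.getD x [] ∈ dp := by
    rw [List.getD_eq_getElem _ _ hx]; exact List.getElem_mem hx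
  have hrlen : 2 ≤ (dp.getD x []).length := hrows _ hmemx
  by_cases hm : (dp'.getD x []).getD 0 0 = -1
  · -- the memo check fails: compute path
    have hs : seed0 dp x = -1 := by
      rcases hdp.2 x hx with hrow | ⟨c0, s0, hv0, hrow⟩
      · rw [seed0, ← hrow]; exact hm
      · by_contra hns
        have hvs : nodeVal dp num links L x = some (seed0 dp x, seed1 dp x) := by
          rw [nodeVal_eq, if_pos hns]
        rw [hv0] at hvs
        obtain ⟨hc0, -⟩ := some_pair_inj hvs
        have hm' : (dp'.getD x []).getD 0 0 = c0 := by
          rw [hrow]; exact (read_set_pair _ _ _ hrlen).1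
        rw [hm', hc0] at hm
        exact hns hm
    rcases hcond x hx with h | ⟨hi0, hiX, hj0, hjX⟩
    · exact absurd hs h
    have hcast1 : (links.getD x (0, 0)).1 = ((links.getD x (0, 0)).1.toNat : Int) :=
      (Int.toNat_of_nonneg hi0).symm
    have hcast2 : (links.getD x (0, 0)).2 = ((links.getD x (0, 0)).2.toNat : Int) :=
      (Int.toNat_of_nonneg hj0).symm
    set i : Nat := (links.getD x (0, 0)).1.toNat with hidef
    set j : Nat := (links.getD x (0, 0)).2.toNat with hjdef
    have hilt : i < x := by rw [hcast1] at hiX; exact_mod_cast hiX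
    have hjlt : j < x := by rw [hcast2] at hjX; exact_mod_cast hjX
    have hin : i < dp.length := hilt.trans hx
    have hjn : j < dp.length := hjlt.trans hx
    have hvalx : nodeVal dp num links L x =
        (match nodeVal dp num links L i, nodeVal dp num links L j with
         | some p, some q => combine L (num.getD x 0) p.1 p.2 q.1 q.2
         | _, _ => none) := by
      rw [nodeVal_eq, if_neg (by simp [hs])]
      rw [dif_pos ⟨hi0, hilt, hj0, hjlt⟩]
    cases hvi : nodeVal dp num links L i with
    | none =>
      have hvxn : nodeVal dp num links L x = none := by rw [hvalx, hvi]
      refine ⟨?_, ?_⟩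
      · intro _ f hf
        obtain ⟨f', rfl⟩ : ∃ f', f = f' + 1 := ⟨f - 1, by omega⟩
        have h1 := ((IH i hilt) hin dp' hdp).1 hvi f' (by omega)
        rw [goA_step, pyAt_row_zero, if_neg (by simpa using hm), pyLink_natCast]
        simp only
        rw [hcast1]
        rcases hr1 : goA num links L f' dp' (i : Int) with ⟨dpa, ba⟩
        rw [hr1] at h1
        simp only at h1
        subst h1
        simp
      · intro c s hcs; rw [hvxn] at hcs; cases hcs
    | some p =>
      obtain ⟨dp1, hdp1, hpres1, hres1, hrun1⟩ :=
        ((IH i hilt) hin dp' hdp).2 p.1 p.2 (by rw [hvi])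
      cases hvj : nodeVal dp num links L j with
      | none =>
        have hvxn : nodeVal dp num links L x = none := by rw [hvalx, hvi, hvj]
        refine ⟨?_, ?_⟩
        · intro _ f hf
          obtain ⟨f', rfl⟩ : ∃ f', f = f' + 1 := ⟨f - 1, by omega⟩
          have h2 := ((IH j hjlt) hjn dp1 hdp1).1 hvj f' (by omega)
          rw [goA_step, pyAt_row_zero, if_neg (by simpa using hm), pyLink_natCast]
          simp only
          rw [hcast1, hrun1 f' (by omega)]
          simp only [if_neg Bool.false_ne_true]
          rw [hcast2]
          rcases hr2 : goA num links L f' dp1 (j : Int) with ⟨dpb, bb⟩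
          rw [hr2] at h2
          simp only at h2
          subst h2
          simp
        · intro c s hcs; rw [hvxn] at hcs; cases hcs
      | some q =>
        obtain ⟨dp2, hdp2, hpres2, hres2j, hrun2⟩ :=
          ((IH j hjlt) hjn dp1 hdp1).2 q.1 q.2 (by rw [hvj])
        have hres2i : dresolved dp num links L dp2 i := hpres2 i hin hres1
        have hpairi : p = ((dp2.getD i []).getD 0 0, (dp2.getD i []).getD 1 0) := by
          have h := hres2i; unfold dresolved at h; rw [hvi] at h
          exact Option.some.injEq _ _ ▸ (by simpa using h)
        have hpairj : q = ((dp2.getD j []).getD 0 0, (dp2.getD j []).getD 1 0) := by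
          have h := hres2j; unfold dresolved at h; rw [hvj] at h
          exact Option.some.injEq _ _ ▸ (by simpa using h)
        have hdi0 : (dp2.getD i []).getD 0 0 = p.1 := by rw [hpairi]
        have hdi1 : (dp2.getD i []).getD 1 0 = p.2 := by rw [hpairi]
        have hdj0 : (dp2.getD j []).getD 0 0 = q.1 := by rw [hpairj]
        have hdj1 : (dp2.getD j []).getD 1 0 = q.2 := by rw [hpairj]
        have hvalx' : nodeVal dp num links L x = combine L (num.getD x 0) p.1 p.2 q.1 q.2 := by
          rw [hvalx, hvi, hvj]
        have hx2 : x < dp2.length := by rw [hdp2.1]; exact hx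
        have hstep : ∀ f' : Nat, x ≤ f' →
            goA num links L (f' + 1) dp' (x : Int) =
            (if num.getD x 0 + p.2 + q.2 ≤ L then
              (dp2.set x (((dp2.getD x []).set 0 (p.1 + q.1 - 1)).set 1 (num.getD x 0 + p.2 + q.2)), false)
            else if num.getD x 0 + p.2 ≤ L ∨ num.getD x 0 + q.2 ≤ L then
              (dp2.set x (((dp2.getD x []).set 0 (p.1 + q.1)).set 1 (num.getD x 0 + min p.2 q.2)), false)
            else if num.getD x 0 ≤ L then
              (dp2.set x (((dp2.getD x []).set 0 (p.1 + q.1 + 1)).set 1 (num.getD x 0)), false)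
            else (dp2, true)) := by
          intro f' hf'
          rw [goA_step, pyAt_row_zero, if_neg (by simpa using hm), pyLink_natCast]
          simp only
          rw [hcast1, hrun1 f' (by omega)]
          simp only [if_neg Bool.false_ne_true]
          rw [hcast2, hrun2 f' (by omega)]
          simp only [if_neg Bool.false_ne_true]
          rw [pyAt_natCast, pyAt_row_zero, pyAt_row_one, pyAt_row_zero, pyAt_row_one]
          rw [hdi0, hdi1, hdj0, hdj1]
          rw [setCell_pair _ _ _ _ hx2, setCell_pair _ _ _ _ hx2, setCell_pair _ _ _ _ hx2]
        have hbuild : ∀ c s, combine L (num.getD x 0) p.1 p.2 q.1 q.2 = some (c, s) →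
            dcompat dp num links L (dp2.set x (((dp2.getD x []).set 0 c).set 1 s)) ∧
            (∀ k, k < dp.length → dresolved dp num links L dp2 k →
              dresolved dp num links L (dp2.set x (((dp2.getD x []).set 0 c).set 1 s)) k) ∧
            dresolved dp num links L (dp2.set x (((dp2.getD x []).set 0 c).set 1 s)) x := by
          intro c s hcs
          have hvcs : nodeVal dp num links L x = some (c, s) := by rw [hvalx', hcs]
          have hrow2len : (dp2.getD x []).length = (dp.getD x []).length := by
            rcases hdp2.2 x hx with hr | ⟨c0, s0, _, hr⟩
            · rw [hr]
            · rw [hr]; simp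
          have hgetDnew : ∀ k, k ≠ x →
              (dp2.set x (((dp2.getD x []).set 0 c).set 1 s)).getD k [] = dp2.getD k [] := by
            intro k hk; exact getD_set_ne' _ _ _ _ _ hk
          have hgetDx : (dp2.set x (((dp2.getD x []).set 0 c).set 1 s)).getD x [] =
              ((dp2.getD x []).set 0 c).set 1 s :=
            getD_set_self' _ _ _ _ hx2
          have hreadx0 : (((dp2.getD x []).set 0 c).set 1 s).getD 0 0 = c :=
            (read_set_pair _ _ _ (by rw [hrow2len]; exact hrlen)).1
          have hreadx1 : (((dp2.getD x []).set 0 c).set 1 s).getD 1 0 = s :=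
            (read_set_pair _ _ _ (by rw [hrow2len]; exact hrlen)).2
          refine ⟨⟨by rw [List.length_set]; exact hdp2.1, ?_⟩, ?_, ?_⟩
          · intro k hk
            by_cases hkx : k = x
            · subst hkx
              refine Or.inr ⟨c, s, hvcs, ?_⟩
              rw [hgetDx]
              rcases hdp2.2 k hk with hr | ⟨c0, s0, hv0, hr⟩
              · rw [hr]
              · rw [hv0] at hvcs
                obtain ⟨rfl, rfl⟩ := some_pair_inj hvcs
                rw [hr]; exact set_pair_idem _ _ _
            · rw [hgetDnew k hkx]
              exact hdp2.2 k hk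
          · intro k hk hres
            by_cases hkx : k = x
            · subst hkx
              unfold dresolved
              rw [hgetDx, hvcs, hreadx0, hreadx1]
            · unfold dresolved
              rw [hgetDnew k hkx]; exact hres
          · unfold dresolved
            rw [hgetDx, hvcs, hreadx0, hreadx1]
        refine ⟨?_, ?_⟩
        · -- failing combine: A returns true
          intro hvn f hf
          rw [hvalx', combine] at hvn
          obtain ⟨f', rfl⟩ : ∃ f', f = f' + 1 := ⟨f - 1, by omega⟩
          by_cases h1 : num.getD x 0 + p.2 + q.2 ≤ L
          · rw [if_pos h1] at hvn; cases hvn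
          by_cases h2 : num.getD x 0 + p.2 ≤ L ∨ num.getD x 0 + q.2 ≤ L
          · rw [if_neg h1, if_pos h2] at hvn; cases hvn
          by_cases h3 : num.getD x 0 ≤ L
          · rw [if_neg h1, if_neg h2, if_pos h3] at hvn; cases hvn
          rw [hstep f' (by omega), if_neg h1, if_neg h2, if_neg h3]
        · -- successful combine: A returns false with the written row
          intro c s hcs
          rw [hvalx'] at hcs
          obtain ⟨hdc, hpr, hrx⟩ := hbuild c s hcs
          refine ⟨dp2.set x (((dp2.getD x []).set 0 c).set 1 s), hdc,
            (fun k hk h => hpr k hk (hpres2 k hk (hpres1 k hk h))), hrx, ?_⟩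
          intro f hf
          obtain ⟨f', rfl⟩ : ∃ f', f = f' + 1 := ⟨f - 1, by omega⟩
          rw [hstep f' (by omega)]
          rw [combine] at hcs
          by_cases h1 : num.getD x 0 + p.2 + q.2 ≤ L
          · rw [if_pos h1] at hcs
            obtain ⟨rfl, rfl⟩ := some_pair_inj hcs
            rw [if_pos h1]
          by_cases h2 : num.getD x 0 + p.2 ≤ L ∨ num.getD x 0 + q.2 ≤ L
          · rw [if_neg h1, if_pos h2] at hcs
            obtain ⟨rfl, rfl⟩ := some_pair_inj hcs
            rw [if_neg h1, if_pos h2]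
          by_cases h3 : num.getD x 0 ≤ L
          · rw [if_neg h1, if_neg h2, if_pos h3] at hcs
            obtain ⟨rfl, rfl⟩ := some_pair_inj hcs
            rw [if_neg h1, if_neg h2, if_pos h3]
          · rw [if_neg h1, if_neg h2, if_neg h3] at hcs; cases hcs
  · -- memo hit: A returns False immediately
    have hres : dresolved dp num links L dp' x := by
      rcases hdp.2 x hx with hrow | ⟨c0, s0, hv0, hrow⟩
      · have hs : seed0 dp x ≠ -1 := by rw [seed0, ← hrow]; exact hm
        unfold dresolved
        rw [nodeVal_eq, if_pos hs, hrow]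
        rfl
      · unfold dresolved
        rw [hv0, hrow, (read_set_pair _ _ _ hrlen).1, (read_set_pair _ _ _ hrlen).2]
    refine ⟨?_, ?_⟩
    · intro h0 _ _
      unfold dresolved at hres; rw [h0] at hres; cases hres
    · intro c s hcs
      refine ⟨dp', hdp, fun k hk h => h, hres, ?_⟩
      intro f hf
      obtain ⟨f', rfl⟩ : ∃ f', f = f' + 1 := ⟨f - 1, by omega⟩
      rw [goA_step, pyAt_row_zero, if_pos (by simpa using hm)]

lemma loopB_sim (dp : List (List Int)) (num : List Int) (links : List (Int × Int)) (L : Int)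
    (hcond : ∀ k, k < dp.length →
      seed0 dp k ≠ -1 ∨
      (0 ≤ (links.getD k (0, 0)).1 ∧ (links.getD k (0, 0)).1 < (k : Int) ∧
       0 ≤ (links.getD k (0, 0)).2 ∧ (links.getD k (0, 0)).2 < (k : Int))) :
    ∀ x : Nat, x < dp.length → ∀ memo, mcompat dp num links L memo →
      (nodeVal dp num links L x = none →
        ∀ (f : Nat) (rest : List (Int × Bool)),
          loopB dp num links L (f + 2 * 3 ^ (x + 1)) (((x : Int), false) :: rest) memo = true) ∧
      (nodeVal dp num links L x ≠ none →
        ∃ memo' u, u ≤ 2 * 3 ^ (x + 1) ∧ mcompat dp num links L memo' ∧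
          (∀ k, k < dp.length → mresolved dp num links L memo k → mresolved dp num links L memo' k) ∧
          mresolved dp num links L memo' x ∧
          ∀ (f : Nat) (rest : List (Int × Bool)),
            loopB dp num links L (f + u) (((x : Int), false) :: rest) memo =
            loopB dp num links L f rest memo') := by
  intro x
  induction x using Nat.strong_induction_on with
  | _ x IH =>
  intro hx memo hmc
  have h3x : 1 ≤ 3 ^ x := Nat.one_le_pow _ _ (by norm_num)
  have h3succ : 3 ^ (x + 1) = 3 ^ x * 3 := pow_succ 3 x
  cases hgx : memo.get? (x : Int) with
  | some p =>
    -- skip: x already in the memo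
    have hvx : nodeVal dp num links L x = some p := by
      have h := (hmc _ _ hgx).2
      rwa [Int.toNat_natCast] at h
    refine ⟨?_, ?_⟩
    · intro h0; rw [h0] at hvx; cases hvx
    · intro _
      refine ⟨memo, 1, by omega, hmc, fun k hk h => h, ?_, ?_⟩
      · unfold mresolved bGet
        rw [hgx, hvx]
      · intro f rest
        rw [show f + 1 = f + 1 from rfl, loopB_wait, if_pos (by rw [hgx]; simp)]
  | none =>
    by_cases hs : seed0 dp x = -1
    · -- expansion path
      rcases hcond x hx with h | ⟨hi0, hiX, hj0, hjX⟩
      · exact absurd hs h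
      have hcast1 : (links.getD x (0, 0)).1 = ((links.getD x (0, 0)).1.toNat : Int) :=
        (Int.toNat_of_nonneg hi0).symm
      have hcast2 : (links.getD x (0, 0)).2 = ((links.getD x (0, 0)).2.toNat : Int) :=
        (Int.toNat_of_nonneg hj0).symm
      set i : Nat := (links.getD x (0, 0)).1.toNat with hidef
      set j : Nat := (links.getD x (0, 0)).2.toNat with hjdef
      have hilt : i < x := by rw [hcast1] at hiX; exact_mod_cast hiX
      have hjlt : j < x := by rw [hcast2] at hjX; exact_mod_cast hjX
      have hin : i < dp.length := hilt.trans hx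
      have hjn : j < dp.length := hjlt.trans hx
      have h3i : 3 ^ (i + 1) ≤ 3 ^ x := Nat.pow_le_pow_right (by norm_num) hilt
      have h3j : 3 ^ (j + 1) ≤ 3 ^ x := Nat.pow_le_pow_right (by norm_num) hjlt
      have hvalx : nodeVal dp num links L x =
          (match nodeVal dp num links L i, nodeVal dp num links L j with
           | some p, some q => combine L (num.getD x 0) p.1 p.2 q.1 q.2
           | _, _ => none) := by
        rw [nodeVal_eq, if_neg (by simp [hs])]
        rw [dif_pos ⟨hi0, hilt, hj0, hjlt⟩]
      -- the expansion step itself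
      have hexp : ∀ (g : Nat) (rest : List (Int × Bool)),
          loopB dp num links L (g + 1) (((x : Int), false) :: rest) memo =
          loopB dp num links L g
            (((i : Int), false) :: ((j : Int), false) :: ((x : Int), true) :: rest) memo := by
        intro g rest
        rw [loopB_wait, if_neg ?_, pyLink_natCast]
        · rw [← hcast1, ← hcast2]
        · rw [hgx, pyAt_row_zero]
          simpa [seed0] using hs
      cases hvi : nodeVal dp num links L i with
      | none =>
        have hvxn : nodeVal dp num links L x = none := by rw [hvalx, hvi]
        refine ⟨?_, fun hne => absurd hvxn hne⟩
        intro _ f rest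
        have hIH := ((IH i hilt) hin memo hmc).1 hvi
        rw [show f + 2 * 3 ^ (x + 1) = (f + 2 * 3 ^ (x + 1) - 1) + 1 from by omega, hexp]
        rw [show f + 2 * 3 ^ (x + 1) - 1 =
            (f + 2 * 3 ^ (x + 1) - 1 - 2 * 3 ^ (i + 1)) + 2 * 3 ^ (i + 1) from by omega]
        exact hIH _ _
      | some p =>
        obtain ⟨memo1, ui, hui, hmc1, hpres1, hres1, hrun1⟩ :=
          ((IH i hilt) hin memo hmc).2 (by rw [hvi]; simp)
        cases hvj : nodeVal dp num links L j with
        | none =>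
          have hvxn : nodeVal dp num links L x = none := by rw [hvalx, hvi, hvj]
          refine ⟨?_, fun hne => absurd hvxn hne⟩
          intro _ f rest
          have hIH := ((IH j hjlt) hjn memo1 hmc1).1 hvj
          rw [show f + 2 * 3 ^ (x + 1) = (f + 2 * 3 ^ (x + 1) - 1) + 1 from by omega, hexp]
          rw [show f + 2 * 3 ^ (x + 1) - 1 =
              (f + 2 * 3 ^ (x + 1) - 1 - ui) + ui from by omega, hrun1]
          rw [show f + 2 * 3 ^ (x + 1) - 1 - ui =
              (f + 2 * 3 ^ (x + 1) - 1 - ui - 2 * 3 ^ (j + 1)) + 2 * 3 ^ (j + 1) from by omega]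
          exact hIH _ _
        | some q =>
          obtain ⟨memo2, uj, huj, hmc2, hpres2, hres2j, hrun2⟩ :=
            ((IH j hjlt) hjn memo1 hmc1).2 (by rw [hvj]; simp)
          have hres2i : mresolved dp num links L memo2 i := hpres2 i hin hres1
          have hpairi : bGet memo2 dp (i : Int) = p := by
            have h := hres2i; unfold mresolved at h; rw [hvi] at h
            exact (Option.some.injEq _ _).mp h.symm
          have hpairj : bGet memo2 dp (j : Int) = q := by
            have h := hres2j; unfold mresolved at h; rw [hvj] at h
            exact (Option.some.injEq _ _).mp h.symm
          have hvalx' : nodeVal dp num links L x = combine L (num.getD x 0) p.1 p.2 q.1 q.2 := by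
            rw [hvalx, hvi, hvj]
          -- the ready step
          have hready : ∀ (g : Nat) (rest : List (Int × Bool)),
              loopB dp num links L (g + 1) (((x : Int), true) :: rest) memo2 =
              (if num.getD x 0 + p.2 + q.2 ≤ L then
                loopB dp num links L g rest (memo2.insert (x : Int) (p.1 + q.1 - 1, num.getD x 0 + p.2 + q.2))
              else if num.getD x 0 + p.2 ≤ L ∨ num.getD x 0 + q.2 ≤ L then
                loopB dp num links L g rest (memo2.insert (x : Int) (p.1 + q.1, num.getD x 0 + min p.2 q.2))
              else if num.getD x 0 ≤ L then
                loopB dp num links L g rest (memo2.insert (x : Int) (p.1 + q.1 + 1, num.getD x 0))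
              else true) := by
            intro g rest
            rw [loopB_ready]
            simp only
            rw [pyLink_natCast, hcast1, hcast2, hpairi, hpairj, pyAt_natCast]
          refine ⟨?_, ?_⟩
          · -- failing combine: B returns True at x's ready step
            intro hvn f rest
            rw [hvalx', combine] at hvn
            by_cases h1 : num.getD x 0 + p.2 + q.2 ≤ L
            · rw [if_pos h1] at hvn; cases hvn
            by_cases h2 : num.getD x 0 + p.2 ≤ L ∨ num.getD x 0 + q.2 ≤ L
            · rw [if_neg h1, if_pos h2] at hvn; cases hvn
            by_cases h3 : num.getD x 0 ≤ L
            · rw [if_neg h1, if_neg h2, if_pos h3] at hvn; cases hvn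
            rw [show f + 2 * 3 ^ (x + 1) = (f + 2 * 3 ^ (x + 1) - 1) + 1 from by omega, hexp]
            rw [show f + 2 * 3 ^ (x + 1) - 1 =
                (f + 2 * 3 ^ (x + 1) - 1 - ui) + ui from by omega, hrun1]
            rw [show f + 2 * 3 ^ (x + 1) - 1 - ui =
                (f + 2 * 3 ^ (x + 1) - 1 - ui - uj) + uj from by omega, hrun2]
            rw [show f + 2 * 3 ^ (x + 1) - 1 - ui - uj =
                (f + 2 * 3 ^ (x + 1) - 2 - ui - uj) + 1 from by omega, hready]
            rw [if_neg h1, if_neg h2, if_neg h3]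
          · -- successful combine: memo gains x
            intro hne
            obtain ⟨c, s, hcs⟩ : ∃ c s, combine L (num.getD x 0) p.1 p.2 q.1 q.2 = some (c, s) := by
              rw [combine]
              by_cases h1 : num.getD x 0 + p.2 + q.2 ≤ L
              · exact ⟨_, _, by rw [if_pos h1]⟩
              by_cases h2 : num.getD x 0 + p.2 ≤ L ∨ num.getD x 0 + q.2 ≤ L
              · exact ⟨_, _, by rw [if_neg h1, if_pos h2]⟩
              by_cases h3 : num.getD x 0 ≤ L
              · exact ⟨_, _, by rw [if_neg h1, if_neg h2, if_pos h3]⟩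
              · exact absurd (by rw [hvalx', combine, if_neg h1, if_neg h2, if_neg h3]) hne
            have hvcs : nodeVal dp num links L x = some (c, s) := by rw [hvalx', hcs]
            refine ⟨memo2.insert (x : Int) (c, s), ui + uj + 2, by omega, ?_, ?_, ?_, ?_⟩
            · intro k pk hk
              rw [PySem.Dict.get?_insert] at hk
              by_cases hkx : k = (x : Int)
              · rw [if_pos hkx] at hk
                obtain rfl : (c, s) = pk := by injection hk
                subst hkx
                refine ⟨by positivity, ?_⟩
                rw [Int.toNat_natCast]
                exact hvcs
              · rw [if_neg hkx] at hk
                exact hmc2 k pk hk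
            · intro k hk hres
              by_cases hkx : (k : Int) = (x : Int)
              · have : k = x := by exact_mod_cast hkx
                subst this
                unfold mresolved bGet
                rw [PySem.Dict.get?_insert, if_pos rfl, hvcs]
              · unfold mresolved bGet at *
                rw [PySem.Dict.get?_insert, if_neg hkx]
                exact hpres2 k hk (hpres1 k hk hres)
            · unfold mresolved bGet
              rw [PySem.Dict.get?_insert, if_pos rfl, hvcs]
            · intro f rest
              rw [show f + (ui + uj + 2) = (f + ui + uj + 1) + 1 from by omega, hexp]
              rw [show f + ui + uj + 1 = (f + uj + 1) + ui from by omega, hrun1]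
              rw [show f + uj + 1 = (f + 1) + uj from by omega, hrun2]
              rw [hready]
              rw [combine] at hcs
              by_cases h1 : num.getD x 0 + p.2 + q.2 ≤ L
              · rw [if_pos h1] at hcs
                obtain ⟨rfl, rfl⟩ := some_pair_inj hcs
                rw [if_pos h1]
              by_cases h2 : num.getD x 0 + p.2 ≤ L ∨ num.getD x 0 + q.2 ≤ L
              · rw [if_neg h1, if_pos h2] at hcs
                obtain ⟨rfl, rfl⟩ := some_pair_inj hcs
                rw [if_neg h1, if_pos h2]
              by_cases h3 : num.getD x 0 ≤ L
              · rw [if_neg h1, if_neg h2, if_pos h3] at hcs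
                obtain ⟨rfl, rfl⟩ := some_pair_inj hcs
                rw [if_neg h1, if_neg h2, if_pos h3]
              · rw [if_neg h1, if_neg h2, if_neg h3] at hcs; cases hcs
    · -- skip: dp itself memoizes x
      have hvx : nodeVal dp num links L x = some (seed0 dp x, seed1 dp x) := by
        rw [nodeVal_eq, if_pos hs]
      refine ⟨?_, ?_⟩
      · intro h0; rw [h0] at hvx; cases hvx
      · intro _
        refine ⟨memo, 1, by omega, hmc, fun k hk h => h, ?_, ?_⟩
        · unfold mresolved bGet
          rw [hgx, hvx, pyAt_row_zero, pyAt_row_one]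
          rfl
        · intro f rest
          rw [show f + 1 = f + 1 from rfl, loopB_wait, if_pos ?_]
          rw [hgx, pyAt_row_zero]
          simpa [seed0] using hs

-- ===== VERDICT (by name: the statement is the Claim_ definition above) =====
theorem go_spec : Claim_equal_go := by
  unfold Claim_equal_go
  intro dp v num links L _ hpre
  unfold Spec_go go go_alt
  rw [Pre_go] at hpre
  have hpre' : preMemo dp v = true ∨ preRec dp v num links = true := by
    simpa [Bool.or_eq_true] using hpre
  rcases hpre' with hc1 | hc2
  · -- immediate memo hit (Python index semantics, wraparound included)
    unfold preMemo at hc1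
    rcases hg : PySem.List.pyGet? dp v with _ | row <;> rw [hg] at hc1
    · simp at hc1
    have hcm : (match PySem.List.pyGet? row 0 with
        | none => false
        | some a => a != -1) = true := hc1
    rcases hg0 : PySem.List.pyGet? row 0 with _ | a <;> rw [hg0] at hcm
    · simp at hcm
    have ha : a ≠ -1 := by simpa using hcm
    have hread : pyAt (pyRow dp v) 0 = a := by
      rw [pyRow, pyAt, PySem.List.pyGetD, PySem.List.pyGetD, hg]
      simp [hg0]
    rw [goA_step, if_pos (by rw [hread]; exact ha)]
    rw [loopB_wait, if_pos (by rw [hread, PySem.Dict.get?_empty]; simp [ha]), loopB_nil]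
  · -- recursive case
    obtain ⟨hv0, hvlt, hnum, hlinks, hrows, hcond⟩ := (preRec_iff dp v num links).mp hc2
    have hvx : v = (v.toNat : Int) := (Int.toNat_of_nonneg hv0).symm
    set X : Nat := v.toNat with hX
    have hXlt : X < dp.length := by
      rw [hvx] at hvlt; exact_mod_cast hvlt
    have hA := goA_sim dp num links L hrows hcond X hXlt dp ⟨rfl, fun k hk => Or.inl rfl⟩
    have hB := loopB_sim dp num links L hcond X hXlt PySem.Dict.empty
      (by intro k p h; rw [PySem.Dict.get?_empty] at h; cases h)
    have hIle : 2 * 3 ^ (X + 1) ≤ 2 * 3 ^ dp.length + 1 := by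
      have : (3 : Nat) ^ (X + 1) ≤ 3 ^ dp.length := Nat.pow_le_pow_right (by norm_num) hXlt
      omega
    rw [hvx]
    cases hval : nodeVal dp num links L X with
    | none =>
      rw [hA.1 hval (dp.length + 1) (by omega)]
      rw [show 2 * 3 ^ dp.length + 1 =
          (2 * 3 ^ dp.length + 1 - 2 * 3 ^ (X + 1)) + 2 * 3 ^ (X + 1) from by omega]
      rw [hB.1 hval _ []]
    | some p =>
      obtain ⟨dp'', _, _, _, hrun⟩ := hA.2 p.1 p.2 (by rw [hval])
      obtain ⟨memo', u, hu, _, _, _, hbrun⟩ := hB.2 (by rw [hval]; simp)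
      rw [hrun (dp.length + 1) (by omega)]
      rw [show 2 * 3 ^ dp.length + 1 = (2 * 3 ^ dp.length + 1 - u) + u from by omega]
      rw [hbrun _ [], loopB_nil]
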